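-- pv_equiv track=rewrite | github.com/CorsairCoalition/PyBot | example_flobot.py | get_highest_army_index
-- ===== SOURCE A (Python) =====
-- def get_highest_army_index(tiles: list[tuple], path: list[int]):
--     tile = -1
--     armies = 0
--     for key, value in tiles:
--         if value > armies and value > 1 and key not in path:
--             tile = key
--             armies = value
--
--     return tile
-- ===== SOURCE B (Python) =====
-- def get_highest_army_index(tiles: list[tuple], path: list[int]):
--     blocked = set(path)
--     eligible = [(key, value) for key, value in tiles if value > 1 and key not in blocked]
--     if not eligible:
--         return -1
--     return max(eligible, key=lambda kv: kv[1])[0]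
-- ===== Notes on version B (the rewrite author's own statement) =====
-- stated objective: simpler
-- what changed: Replaces A's running-maximum accumulation loop over raw tiles (with the three-way update condition) by a filter-then-reduce decomposition: build the eligible list once, return -1 if empty, else the key of the first maximal element via max with a key function.
import Mathlib
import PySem

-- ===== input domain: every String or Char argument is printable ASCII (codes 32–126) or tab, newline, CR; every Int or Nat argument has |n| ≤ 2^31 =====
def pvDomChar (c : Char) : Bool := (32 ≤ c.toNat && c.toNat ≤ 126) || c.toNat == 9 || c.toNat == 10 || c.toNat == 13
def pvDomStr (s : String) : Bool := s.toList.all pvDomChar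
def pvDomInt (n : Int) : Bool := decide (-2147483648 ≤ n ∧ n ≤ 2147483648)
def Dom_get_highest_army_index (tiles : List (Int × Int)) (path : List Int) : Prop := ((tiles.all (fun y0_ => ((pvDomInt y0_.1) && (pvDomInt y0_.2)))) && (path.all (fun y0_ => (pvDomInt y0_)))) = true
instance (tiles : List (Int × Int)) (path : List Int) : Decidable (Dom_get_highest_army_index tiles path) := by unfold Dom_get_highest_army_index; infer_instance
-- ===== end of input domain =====

-- ===== PORT A =====
-- B replaces A's running-maximum loop by a filter-then-reduce decomposition; same return value everywhere.
def get_highest_army_index (tiles : List (Int × Int)) (path : List Int) : Int :=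
  -- tile = -1; armies = 0; for key, value in tiles: if value > armies and value > 1 and key not in path: ...
  (tiles.foldl
    (fun (st : Int × Int) kv =>
      if kv.2 > st.2 && kv.2 > 1 && !(path.contains kv.1) then (kv.1, kv.2) else st)
    (-1, 0)).1

-- ===== PORT B =====
def get_highest_army_index_alt (tiles : List (Int × Int)) (path : List Int) : Int :=
  let blocked : PySem.Set Int := PySem.Set.ofList path
  let eligible := tiles.filter (fun kv => kv.2 > 1 && !(PySem.Set.contains blocked kv.1))
  match eligible with
  | [] => -1
  -- max(eligible, key=lambda kv: kv[1]): first maximal element by second component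
  | h :: t => (t.foldl (fun best kv => if kv.2 > best.2 then kv else best) h).1

-- ===== PRECONDITION & SPEC =====
def Spec_get_highest_army_index (tiles : List (Int × Int)) (path : List Int) (out : Int) : Prop := out = get_highest_army_index_alt tiles path
instance (tiles : List (Int × Int)) (path : List Int) (out : Int) : Decidable (Spec_get_highest_army_index tiles path out) := by unfold Spec_get_highest_army_index; infer_instance

-- ===== CLAIM (what is proved, stated in full; the proofs are below) =====
def Claim_equal_get_highest_army_index : Prop := ∀ (tiles : List (Int × Int)) (path : List Int), Dom_get_highest_army_index tiles path → Spec_get_highest_army_index tiles path (get_highest_army_index tiles path)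

-- ===== LEMMAS AND PROOFS =====

-- ===== VERDICT (by name: the statement is the Claim_ definition above) =====
-- step function of A's loop
def stepA (path : List Int) (st : Int × Int) (kv : Int × Int) : Int × Int :=
  if kv.2 > st.2 && kv.2 > 1 && !(path.contains kv.1) then (kv.1, kv.2) else st

lemma stepA_eq (path : List Int) (st kv : Int × Int) :
    stepA path st kv = if kv.2 > st.2 ∧ kv.2 > 1 ∧ kv.1 ∉ path then kv else st := by
  simp only [stepA, Bool.and_eq_true, decide_eq_true_iff, Bool.not_eq_true',
    List.contains_eq_mem, decide_eq_false_iff_not, and_assoc]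

-- A's fold skips exactly the non-eligible tiles
lemma foldA_filter (path : List Int) (tiles : List (Int × Int)) (st : Int × Int) :
    tiles.foldl (stepA path) st
      = (tiles.filter (fun kv => kv.2 > 1 && !(path.contains kv.1))).foldl (stepA path) st := by
  induction tiles generalizing st with
  | nil => rfl
  | cons h t ih =>
    rw [List.foldl_cons, List.filter_cons]
    by_cases hc : h.2 > 1 ∧ h.1 ∉ path
    · have hb : (decide (h.2 > 1) && !path.contains h.1) = true := by
        simp [List.contains_iff_mem, hc.1, hc.2]
      simp only [hb, if_true, List.foldl_cons, ih]
    · have hb : (decide (h.2 > 1) && !path.contains h.1) = false := by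
        rcases not_and_or.mp hc with h1 | h2
        · simp [h1]
        · simp [List.contains_iff_mem, not_not.mp h2]
      have hid : stepA path st h = st := by
        rw [stepA_eq, if_neg]; tauto
      simp only [hb, Bool.false_eq_true, if_false, hid, ih]

-- on an all-eligible list with accumulator armies > 1, A's step = B's max-step
lemma foldA_eq_foldB (path : List Int) (l : List (Int × Int)) (st : Int × Int)
    (hst : st.2 > 1)
    (hl : ∀ kv ∈ l, kv.2 > 1 ∧ kv.1 ∉ path) :
    l.foldl (stepA path) st
      = l.foldl (fun best kv => if kv.2 > best.2 then kv else best) st := by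
  induction l generalizing st with
  | nil => rfl
  | cons h t ih =>
    have hh := hl h (by simp)
    have hstep : stepA path st h = if h.2 > st.2 then h else st := by
      rw [stepA_eq]
      by_cases hgt : h.2 > st.2
      · rw [if_pos ⟨hgt, hh⟩, if_pos hgt]
      · rw [if_neg (by tauto), if_neg hgt]
    simp only [List.foldl_cons, hstep]
    by_cases hgt : h.2 > st.2
    · simp only [if_pos hgt]
      exact ih h hh.1 (fun kv hm => hl kv (List.mem_cons_of_mem _ hm))
    · simp only [if_neg hgt]
      exact ih st hst (fun kv hm => hl kv (List.mem_cons_of_mem _ hm))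

-- ===== VERDICT (by name: the statement is the Claim_ definition above) =====
theorem get_highest_army_index_spec : Claim_equal_get_highest_army_index := by
  intro tiles path _
  unfold Spec_get_highest_army_index get_highest_army_index get_highest_army_index_alt
  have hfilter :
      tiles.filter (fun kv => kv.2 > 1 && !(PySem.Set.contains (PySem.Set.ofList path) kv.1))
        = tiles.filter (fun kv => kv.2 > 1 && !(path.contains kv.1)) := by
    apply List.filter_congr; intro kv _
    have : PySem.Set.contains (PySem.Set.ofList path) kv.1 = path.contains kv.1 := by
      simp [PySem.Set.contains, PySem.Set.mem_ofList, List.contains_iff_mem]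
    rw [this]
  have hA : (tiles.foldl (stepA path) (-1, 0))
      = (tiles.filter (fun kv => kv.2 > 1 && !(path.contains kv.1))).foldl (stepA path) (-1, 0) :=
    foldA_filter path tiles _
  show (tiles.foldl (stepA path) (-1, 0)).1 = _
  simp only [hfilter, hA]
  cases he : tiles.filter (fun kv => kv.2 > 1 && !(path.contains kv.1)) with
  | nil => rfl
  | cons h t =>
    have hmem : ∀ kv ∈ h :: t, kv.2 > 1 ∧ kv.1 ∉ path := by
      intro kv hm
      have := (List.mem_filter.mp (he ▸ hm)).2
      simpa [List.contains_iff_mem] using this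
    have hh := hmem h (by simp)
    have hfirst : stepA path (-1, 0) h = h := by
      rw [stepA_eq, if_pos ⟨by have := hh.1; omega, hh⟩]
    simp only [List.foldl_cons, hfirst]
    rw [foldA_eq_foldB path t h hh.1 (fun kv hm => hmem kv (List.mem_cons_of_mem _ hm))]
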